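-- pv_equiv track=rewrite | github.com/ahoque1999/competitive_programming | orac_and_models.py | answer
-- ===== SOURCE A (Python) =====
-- from typing import NamedTuple, List
--
-- def answer(n_ini: int, s_ini: List[int]):
--     """ given a list of numbers find largest
--     size of list obtained under conditions """
--
--     maxi = [1] * n_ini
--
--     for ind in range(n_ini, 1-1, -1):
--         cand = [
--             indp
--             for indp in range(ind*2, n_ini+1, ind)
--             if s_ini[indp-1] > s_ini[ind-1]
--         ]
--         if cand == []:
--             continue
--         maxi[ind-1] += max([maxi[indp-1] for indp in cand])
--
--     return max(maxi)
-- ===== SOURCE B (Python) =====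
-- from typing import List
--
-- def answer(n_ini: int, s_ini: List[int]):
--     """ given a list of numbers find largest
--     size of list obtained under conditions """
--
--     # level-synchronous BFS on the divisibility DAG: frontier k holds the
--     # indices where some valid chain of length k ends; the answer is the
--     # number of rounds until the frontier empties (no per-index DP array)
--     frontier = set(range(1, n_ini + 1))
--     length = 0
--     while frontier:
--         length += 1
--         nxt = set()
--         for i in frontier:
--             for j in range(2 * i, n_ini + 1, i):
--                 if s_ini[j - 1] > s_ini[i - 1]:
--                     nxt.add(j)
--         frontier = nxt
--     return length
-- ===== Notes on version B (the rewrite author's own statement) =====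
-- stated objective: alternative
-- what changed: Replaces the per-index DP array (backward pull of 1+max over finalized multiples) by a level-synchronous BFS on the divisibility DAG: a frontier set of indices is expanded to the multiples with larger values, and the answer is the count of rounds until the frontier empties - no chain-length array exists at all.
import Mathlib
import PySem

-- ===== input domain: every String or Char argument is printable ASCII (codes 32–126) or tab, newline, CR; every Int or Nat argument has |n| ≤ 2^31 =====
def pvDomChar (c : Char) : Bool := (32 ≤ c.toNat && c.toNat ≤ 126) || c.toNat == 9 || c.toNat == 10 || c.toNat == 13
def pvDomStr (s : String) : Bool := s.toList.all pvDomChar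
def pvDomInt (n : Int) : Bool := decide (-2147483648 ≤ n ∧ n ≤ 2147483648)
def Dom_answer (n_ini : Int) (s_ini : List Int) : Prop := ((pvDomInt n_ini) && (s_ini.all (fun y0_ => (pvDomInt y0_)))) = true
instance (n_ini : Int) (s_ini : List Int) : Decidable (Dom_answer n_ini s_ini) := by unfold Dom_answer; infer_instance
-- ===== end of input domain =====

-- B replaces A's per-index chain-length DP array by a level-synchronous BFS on the
-- divisibility DAG: a frontier set of indices is repeatedly expanded to the multiples
-- with larger values and the answer is the number of rounds until it empties
-- (no chain-length array exists in B at all); same task, different algorithm.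


-- ===== PORT A =====
-- body of A's loop: build cand (multiples with a larger value), skip if empty,
-- else add max of their maxi entries to maxi[ind-1]
def aStep (n_ini : Int) (s_ini : List Int) (maxi : List Int) (ind : Int) : List Int :=
  let cand := (PySem.List.pyRange (ind * 2) (n_ini + 1) ind).filter
    (fun indp => decide (PySem.List.pyGetD s_ini (ind - 1) 0 < PySem.List.pyGetD s_ini (indp - 1) 0))
  if cand = [] then maxi
  else maxi.set (ind - 1).toNat (PySem.List.pyGetD maxi (ind - 1) 0 +
    ((PySem.List.max? (cand.map (fun indp => PySem.List.pyGetD maxi (indp - 1) 0)) (fun x => x)).getD 0))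

def answer (n_ini : Int) (s_ini : List Int) : Int :=
  let maxi := PySem.List.pyRepeat [1] n_ini
  let maxi := (PySem.List.pyRange n_ini 0 (-1)).foldl (aStep n_ini s_ini) maxi
  (PySem.List.max? maxi (fun x => x)).getD 0

-- ===== PORT B =====
-- innermost statement of B: add the multiple j to nxt when its value is larger
def bAdd (s_ini : List Int) (i : Int) (nxt : List Int) (j : Int) : List Int :=
  if PySem.List.pyGetD s_ini (i - 1) 0 < PySem.List.pyGetD s_ini (j - 1) 0 then
    PySem.Set.add nxt j
  else nxt

-- one BFS round: expand the frontier set to the multiples with larger values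
def bNext (n_ini : Int) (s_ini : List Int) (frontier : List Int) : List Int :=
  frontier.foldl
    (fun nxt i => (PySem.List.pyRange (2 * i) (n_ini + 1) i).foldl (bAdd s_ini i) nxt)
    PySem.Set.empty

-- the while loop; the fuel bound only makes the recursion structural (chain lengths
-- are at most n_ini, so it is never exhausted on the admitted inputs)
def bLoop (n_ini : Int) (s_ini : List Int) : Nat → List Int → Int → Int
  | 0, _, length => length
  | fuel + 1, frontier, length =>
    if frontier = [] then length
    else bLoop n_ini s_ini fuel (bNext n_ini s_ini frontier) (length + 1)

def answer_alt (n_ini : Int) (s_ini : List Int) : Int :=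
  bLoop n_ini s_ini (n_ini.toNat + 1)
    (PySem.Set.ofList (PySem.List.pyRange 1 (n_ini + 1) 1)) 0

-- ===== PRECONDITION & SPEC =====
-- Pre_ excludes exactly the inputs on which the Python A raises: n_ini < 1 makes max([]) a
-- ValueError, and for n_ini ≥ 2 the loops read s_ini[1..n_ini-1], an IndexError when
-- s_ini is shorter than n_ini (for n_ini = 1 nothing is read, so any s_ini is fine).
def Pre_answer (n_ini : Int) (s_ini : List Int) : Prop :=
  1 ≤ n_ini ∧ (n_ini = 1 ∨ n_ini ≤ (s_ini.length : Int))
instance (n_ini : Int) (s_ini : List Int) : Decidable (Pre_answer n_ini s_ini) := by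
  unfold Pre_answer; infer_instance

def pvWitness_answer : Int × List Int := (4, [5, 3, 4, 6])

def Spec_answer (n_ini : Int) (s_ini : List Int) (out : Int) : Prop := out = answer_alt n_ini s_ini
instance (n_ini : Int) (s_ini : List Int) (out : Int) : Decidable (Spec_answer n_ini s_ini out) := by unfold Spec_answer; infer_instance

-- ===== CLAIM (what is proved, stated in full; the proofs are below) =====
def Claim_equal_answer : Prop := ∀ (n_ini : Int) (s_ini : List Int), Dom_answer n_ini s_ini → Pre_answer n_ini s_ini → Spec_answer n_ini s_ini (answer n_ini s_ini)

-- ===== LEMMAS AND PROOFS =====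

-- value of the Python list at 1-based position j
def valN (s : List Int) (j : Nat) : Int := s.getD (j - 1) 0

-- multiples of i in (i, n] whose value is larger (A's candidate set, Nat form)
def succsN (n : Nat) (s : List Int) (i : Nat) : List Nat :=
  (List.range' (i + 1) (n - i)).filter (fun j => decide (i ∣ j) && decide (valN s i < valN s j))

lemma mem_succsN {n : Nat} {s : List Int} {i j : Nat} :
    j ∈ succsN n s i ↔ i < j ∧ j ≤ n ∧ i ∣ j ∧ valN s i < valN s j := by
  simp only [succsN, List.mem_filter, List.mem_range'_1, Bool.and_eq_true, decide_eq_true_eq]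
  constructor
  · rintro ⟨⟨h1, h2⟩, h3, h4⟩; exact ⟨by omega, by omega, h3, h4⟩
  · rintro ⟨h1, h2, h3, h4⟩; exact ⟨⟨by omega, by omega⟩, h3, h4⟩

-- proper divisors of j with a smaller value (B's predecessor set, Nat form)
def predsN (s : List Int) (j : Nat) : List Nat :=
  (List.range' 1 (j - 1)).filter (fun d => decide (d ∣ j) && decide (valN s d < valN s j))

lemma mem_predsN {s : List Int} {j d : Nat} :
    d ∈ predsN s j ↔ 1 ≤ d ∧ d < j ∧ d ∣ j ∧ valN s d < valN s j := by
  simp only [predsN, List.mem_filter, List.mem_range'_1, Bool.and_eq_true, decide_eq_true_eq]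
  constructor
  · rintro ⟨⟨h1, h2⟩, h3, h4⟩; exact ⟨h1, by omega, h3, h4⟩
  · rintro ⟨h1, h2, h3, h4⟩; exact ⟨⟨h1, by omega⟩, h3, h4⟩

-- longest chain STARTING at i (what A's cell maxi[i-1] holds)
def fDP (n : Nat) (s : List Int) (i : Nat) : Int :=
  1 + ((succsN n s i).attach.map (fun jh => fDP n s jh.1)).foldl max 0
termination_by n - i
decreasing_by
  have h := mem_succsN.mp jh.2
  omega

-- longest chain ENDING at j (B's frontier after k rounds is {j : k+1 ≤ gDP j})
def gDP (s : List Int) (j : Nat) : Int :=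
  1 + ((predsN s j).attach.map (fun dh => gDP s dh.1)).foldl max 0
termination_by j
decreasing_by
  have h := mem_predsN.mp dh.2
  omega

lemma fDP_eq (n : Nat) (s : List Int) (i : Nat) :
    fDP n s i = 1 + ((succsN n s i).map (fDP n s)).foldl max 0 := by
  rw [fDP, List.attach_map_val]

lemma gDP_eq (s : List Int) (j : Nat) :
    gDP s j = 1 + ((predsN s j).map (gDP s)).foldl max 0 := by
  rw [gDP, List.attach_map_val]

lemma fDP_pos (n : Nat) (s : List Int) (i : Nat) : 1 ≤ fDP n s i := by
  rw [fDP_eq]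
  have h := (PySem.List.le_foldl_max ((succsN n s i).map (fDP n s)) 0).1
  omega

lemma gDP_pos (s : List Int) (j : Nat) : 1 ≤ gDP s j := by
  rw [gDP_eq]
  have h := (PySem.List.le_foldl_max ((predsN s j).map (gDP s)) 0).1
  omega

-- a chain ending at j visits strictly increasing positive indices, so gDP j ≤ j
lemma gDP_le (s : List Int) : ∀ j : Nat, 1 ≤ j → gDP s j ≤ (j : Int) := by
  intro j
  induction j using Nat.strong_induction_on with
  | _ j ih =>
    intro hj
    rw [gDP_eq]
    have hbd : ∀ y ∈ (predsN s j).map (gDP s), y ≤ (j : Int) - 1 := by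
      intro y hy
      rw [List.mem_map] at hy
      obtain ⟨d, hd, hdy⟩ := hy
      obtain ⟨hd1, hd2, _, _⟩ := mem_predsN.mp hd
      have := ih d hd2 hd1
      omega
    rcases PySem.List.foldl_max_mem ((predsN s j).map (gDP s)) 0 with h | h
    · omega
    · have := hbd _ h
      omega

-- running max only depends on the set of elements
lemma foldl_max_congr_mem {l₁ l₂ : List Int} (a : Int) (h : ∀ y, y ∈ l₁ ↔ y ∈ l₂) :
    l₁.foldl max a = l₂.foldl max a := by
  apply le_antisymm
  · rcases PySem.List.foldl_max_mem l₁ a with h1 | h1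
    · rw [h1]; exact (PySem.List.le_foldl_max l₂ a).1
    · exact (PySem.List.le_foldl_max l₂ a).2 _ ((h _).mp h1)
  · rcases PySem.List.foldl_max_mem l₂ a with h1 | h1
    · rw [h1]; exact (PySem.List.le_foldl_max l₁ a).1
    · exact (PySem.List.le_foldl_max l₁ a).2 _ ((h _).mpr h1)

-- the chain relation: b is a larger multiple of a, within range, with a larger value
def RN (n : Nat) (s : List Int) (a b : Nat) : Prop :=
  a ∣ b ∧ a < b ∧ b ≤ n ∧ valN s a < valN s b

lemma chain_le_f (n : Nat) (s : List Int) :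
    ∀ (c : List Nat) (i : Nat), i ≤ n → List.IsChain (RN n s) (i :: c) →
      (c.length + 1 : Int) ≤ fDP n s i := by
  intro c
  induction c with
  | nil => intro i h1 _; simpa using fDP_pos n s i
  | cons j c' ih =>
    intro i hi hch
    rw [List.isChain_cons_cons] at hch
    obtain ⟨⟨hd, hlt, hle, hv⟩, hch'⟩ := hch
    have hj : j ∈ succsN n s i := mem_succsN.mpr ⟨hlt, hle, hd, hv⟩
    have h1 : (c'.length + 1 : Int) ≤ fDP n s j := ih j hle hch'
    have h2 : fDP n s j ∈ (succsN n s i).map (fDP n s) := List.mem_map_of_mem hj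
    have h3 := (PySem.List.le_foldl_max ((succsN n s i).map (fDP n s)) 0).2 _ h2
    rw [fDP_eq]
    simp only [List.length_cons]
    push_cast
    omega

lemma chain_le_g (n : Nat) (s : List Int) (c : List Nat) :
    ∀ (j : Nat), List.IsChain (RN n s) (c ++ [j]) → (c.length + 1 : Int) ≤ gDP s j := by
  induction c using List.reverseRecOn with
  | nil => intro j _; simp; exact gDP_pos s j
  | append_singleton c' d ih =>
    intro j hch
    rw [List.isChain_append] at hch
    obtain ⟨h1, _, h3⟩ := hch
    have hR : RN n s d j := h3 d (by simp) j rfl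
    obtain ⟨hd, hlt, hle, hv⟩ := hR
    have hd1 : 1 ≤ d := by
      rcases Nat.eq_zero_or_pos d with h | h
      · subst h; obtain ⟨t, ht⟩ := hd; omega
      · exact h
    have hmem : d ∈ predsN s j := mem_predsN.mpr ⟨hd1, hlt, hd, hv⟩
    have hih : (c'.length + 1 : Int) ≤ gDP s d := ih d h1
    have h2 : gDP s d ∈ (predsN s j).map (gDP s) := List.mem_map_of_mem hmem
    have h3' := (PySem.List.le_foldl_max ((predsN s j).map (gDP s)) 0).2 _ h2
    rw [gDP_eq]
    simp only [List.length_append, List.length_cons, List.length_nil]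
    push_cast
    omega

theorem f_chain (n : Nat) (s : List Int) (i : Nat) (h1 : 1 ≤ i) (h2 : i ≤ n) :
    ∃ c : List Nat, List.IsChain (RN n s) (i :: c) ∧ (∀ x ∈ i :: c, 1 ≤ x ∧ x ≤ n) ∧
      fDP n s i = c.length + 1 := by
  rcases PySem.List.foldl_max_mem ((succsN n s i).map (fDP n s)) 0 with h | h
  · refine ⟨[], List.IsChain.singleton i, ?_, ?_⟩
    · intro x hx; simp at hx; subst hx; exact ⟨h1, h2⟩
    · rw [fDP_eq, h]; simp
  · rw [List.mem_map] at h
    obtain ⟨j, hj, hfj⟩ := h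
    obtain ⟨hlt, hle, hdvd, hv⟩ := mem_succsN.mp hj
    obtain ⟨c', hch', hbd', hlen'⟩ := f_chain n s j (by omega) hle
    refine ⟨j :: c', ?_, ?_, ?_⟩
    · exact List.isChain_cons_cons.mpr ⟨⟨hdvd, hlt, hle, hv⟩, hch'⟩
    · intro x hx
      rcases List.mem_cons.mp hx with h | h
      · subst h; exact ⟨h1, h2⟩
      · exact hbd' x h
    · rw [fDP_eq, ← hfj, hlen']
      simp only [List.length_cons]
      push_cast
      ring
termination_by n - i
decreasing_by omega

theorem g_chain (n : Nat) (s : List Int) (j : Nat) (h1 : 1 ≤ j) (h2 : j ≤ n) :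
    ∃ c : List Nat, List.IsChain (RN n s) (c ++ [j]) ∧ (∀ x ∈ c ++ [j], 1 ≤ x ∧ x ≤ n) ∧
      gDP s j = c.length + 1 := by
  rcases PySem.List.foldl_max_mem ((predsN s j).map (gDP s)) 0 with h | h
  · refine ⟨[], by simp, ?_, ?_⟩
    · intro x hx; simp at hx; subst hx; exact ⟨h1, h2⟩
    · rw [gDP_eq, h]; simp
  · rw [List.mem_map] at h
    obtain ⟨d, hd, hgd⟩ := h
    obtain ⟨hd1, hlt, hdvd, hv⟩ := mem_predsN.mp hd
    obtain ⟨c', hch', hbd', hlen'⟩ := g_chain n s d hd1 (by omega)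
    refine ⟨c' ++ [d], ?_, ?_, ?_⟩
    · rw [List.isChain_append]
      refine ⟨hch', List.IsChain.singleton j, ?_⟩
      intro x hx y hy
      simp at hx hy
      subst hx; subst hy
      exact ⟨hdvd, hlt, h2, hv⟩
    · intro x hx
      rcases List.mem_append.mp hx with h | h
      · exact hbd' x h
      · simp at h; subst h; exact ⟨h1, h2⟩
    · rw [gDP_eq, ← hgd, hlen']
      simp only [List.length_append, List.length_cons, List.length_nil]
      push_cast
      ring
termination_by j
decreasing_by omega

-- the two per-cell quantities have the same maximum over 1..n
lemma max_f_eq_max_g (n : Nat) (s : List Int) (hn : 1 ≤ n) :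
    (PySem.List.max? ((List.range n).map (fun j => fDP n s (j + 1))) (fun x => x)).getD 0 =
    (PySem.List.max? ((List.range n).map (fun j => gDP s (j + 1))) (fun x => x)).getD 0 := by
  have hne1 : (List.range n).map (fun j => fDP n s (j + 1)) ≠ [] := by
    simp [List.map_eq_nil_iff, List.range_eq_nil]; omega
  have hne2 : (List.range n).map (fun j => gDP s (j + 1)) ≠ [] := by
    simp [List.map_eq_nil_iff, List.range_eq_nil]; omega
  obtain ⟨m1, hm1⟩ : ∃ m, PySem.List.max? ((List.range n).map (fun j => fDP n s (j + 1))) (fun x => x) = some m := by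
    cases hx : PySem.List.max? ((List.range n).map (fun j => fDP n s (j + 1))) (fun x => x) with
    | none => exact absurd ((PySem.List.max?_eq_none_iff _ _).mp hx) hne1
    | some m => exact ⟨m, rfl⟩
  obtain ⟨m2, hm2⟩ : ∃ m, PySem.List.max? ((List.range n).map (fun j => gDP s (j + 1))) (fun x => x) = some m := by
    cases hx : PySem.List.max? ((List.range n).map (fun j => gDP s (j + 1))) (fun x => x) with
    | none => exact absurd ((PySem.List.max?_eq_none_iff _ _).mp hx) hne2
    | some m => exact ⟨m, rfl⟩
  rw [hm1, hm2]
  simp only [Option.getD_some]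
  apply le_antisymm
  · -- m1 = fDP i0 for some i0; its chain ends at some j0, so m1 ≤ gDP j0 ≤ m2
    have hmem := PySem.List.max?_mem hm1
    rw [List.mem_map] at hmem
    obtain ⟨i0, hi0, hfi0⟩ := hmem
    rw [List.mem_range] at hi0
    obtain ⟨c, hch, hbd, hlen⟩ := f_chain n s (i0 + 1) (by omega) (by omega)
    have hne : ((i0 + 1) :: c) ≠ [] := by simp
    set j0 := ((i0 + 1) :: c).getLast hne with hj0
    have hsplit : ((i0 + 1) :: c).dropLast ++ [j0] = (i0 + 1) :: c := List.dropLast_append_getLast hne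
    have hch2 : List.IsChain (RN n s) (((i0 + 1) :: c).dropLast ++ [j0]) := by rw [hsplit]; exact hch
    have hlen2 : (((i0 + 1) :: c).dropLast.length + 1 : Int) ≤ gDP s j0 := chain_le_g n s _ j0 hch2
    have hlast_mem : j0 ∈ (i0 + 1) :: c := List.getLast_mem hne
    obtain ⟨hj1, hj2⟩ := hbd j0 hlast_mem
    have hgj0 : gDP s j0 ∈ (List.range n).map (fun j => gDP s (j + 1)) := by
      rw [List.mem_map]
      exact ⟨j0 - 1, by rw [List.mem_range]; omega, by congr 1; omega⟩
    have hle2 := PySem.List.max?_isMax hm2 _ hgj0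
    have hdl : ((i0 + 1) :: c).dropLast.length = c.length := by simp
    rw [← hfi0, hlen]
    simp only at hle2
    rw [hdl] at hlen2
    omega
  · have hmem := PySem.List.max?_mem hm2
    rw [List.mem_map] at hmem
    obtain ⟨j0, hj0, hgj0⟩ := hmem
    rw [List.mem_range] at hj0
    obtain ⟨c, hch, hbd, hlen⟩ := g_chain n s (j0 + 1) (by omega) (by omega)
    have hne : (c ++ [j0 + 1]) ≠ [] := by simp
    set i0 := (c ++ [j0 + 1]).head hne with hi0
    have hsplit : i0 :: (c ++ [j0 + 1]).tail = c ++ [j0 + 1] := (List.cons_head_tail hne)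
    have hch2 : List.IsChain (RN n s) (i0 :: (c ++ [j0 + 1]).tail) := by rw [hsplit]; exact hch
    have hhead_mem : i0 ∈ c ++ [j0 + 1] := List.head_mem hne
    obtain ⟨hi1, hi2⟩ := hbd i0 hhead_mem
    have hlen2 : ((c ++ [j0 + 1]).tail.length + 1 : Int) ≤ fDP n s i0 := chain_le_f n s _ i0 hi2 hch2
    have hfi0 : fDP n s i0 ∈ (List.range n).map (fun j => fDP n s (j + 1)) := by
      rw [List.mem_map]
      exact ⟨i0 - 1, by rw [List.mem_range]; omega, by congr 1; omega⟩
    have hle1 := PySem.List.max?_isMax hm1 _ hfi0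
    have htl : (c ++ [j0 + 1]).tail.length = c.length := by
      simp [List.length_tail]
    rw [← hgj0, hlen]
    simp only at hle1
    rw [htl] at hlen2
    omega

lemma pyGetD_one_based (s : List Int) (x : Int) (hx : 1 ≤ x) :
    PySem.List.pyGetD s (x - 1) 0 = valN s x.toNat := by
  rw [PySem.List.pyGetD_of_nonneg s 0 (by omega)]
  unfold valN
  congr 1
  omega

-- Python max(l) for a list of nonnegative ints is the running max from 0
lemma maxD0 (l : List Int) (hne : l ≠ []) (hpos : ∀ y ∈ l, 0 ≤ y) :
    (PySem.List.max? l (fun x => x)).getD 0 = l.foldl max 0 := by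
  cases l with
  | nil => exact absurd rfl hne
  | cons c t =>
    rw [PySem.List.max?_id_cons]
    simp only [Option.getD_some, List.foldl_cons]
    have : max 0 c = c := max_eq_right (hpos c (by simp))
    rw [this]

-- A's intermediate array: entries at 1-based index > k finalized, the rest still 1
def listA (n : Nat) (s : List Int) (k : Nat) : List Int :=
  (List.range n).map (fun j => if k ≤ j then fDP n s (j + 1) else 1)

lemma listA_getD (n : Nat) (s : List Int) (k j : Nat) (hj : j < n) :
    (listA n s k).getD j 0 = if k ≤ j then fDP n s (j + 1) else 1 := by
  unfold listA
  rw [List.getD_eq_getElem _ _ (by simpa using hj)]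
  simp

lemma mem_candA (n : Nat) (s : List Int) (i : Nat) (hi : 1 ≤ i) (x : Int) :
    (x ∈ (PySem.List.pyRange (↑i * 2) (↑n + 1) ↑i).filter
      (fun indp => decide (PySem.List.pyGetD s (↑i - 1) 0 < PySem.List.pyGetD s (indp - 1) 0)))
    ↔ (1 ≤ x ∧ x.toNat ∈ succsN n s i) := by
  rw [List.mem_filter]
  rw [PySem.List.mem_pyRange_iff_of_pos (by exact_mod_cast hi) x]
  constructor
  · rintro ⟨⟨h1, h2, h3⟩, h4⟩
    have hx1 : (1 : Int) ≤ x := by omega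
    have hdvd : (↑i : Int) ∣ x := by
      have h5 : (↑i : Int) ∣ ↑i * 2 := ⟨2, rfl⟩
      have := dvd_add h3 h5
      simpa using this
    rw [decide_eq_true_eq, pyGetD_one_based s ↑i (by exact_mod_cast hi),
        pyGetD_one_based s x hx1] at h4
    refine ⟨hx1, mem_succsN.mpr ⟨?_, by omega, ?_, ?_⟩⟩
    · omega
    · have : (↑i : Int) ∣ ↑x.toNat := by rwa [Int.toNat_of_nonneg (by omega)]
      exact_mod_cast this
    · simpa using h4
  · rintro ⟨hx1, hmem⟩
    obtain ⟨hlt, hle, hdvd, hv⟩ := mem_succsN.mp hmem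
    have hxeq : (↑x.toNat : Int) = x := Int.toNat_of_nonneg (by omega)
    have h2x : 2 * i ≤ x.toNat := by
      obtain ⟨t, ht⟩ := hdvd
      have ht2 : 2 ≤ t := by
        rcases Nat.lt_or_ge t 2 with h | h
        · interval_cases t <;> omega
        · exact h
      calc 2 * i = i * 2 := by ring
        _ ≤ i * t := Nat.mul_le_mul_left i ht2
        _ = x.toNat := ht.symm
    refine ⟨⟨by omega, by omega, ?_⟩, ?_⟩
    · have : (↑i : Int) ∣ x := by
        rw [← hxeq]; exact_mod_cast hdvd
      exact dvd_sub this ⟨2, rfl⟩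
    · rw [decide_eq_true_eq, pyGetD_one_based s ↑i (by exact_mod_cast hi),
          pyGetD_one_based s x (by omega)]
      simpa using hv

lemma aStepEq (n : Nat) (s : List Int) (k : Nat) (hk : k < n) :
    aStep ↑n s (listA n s (k + 1)) ↑(k + 1) = listA n s k := by
  unfold aStep
  set i := k + 1 with hidef
  have hcast : ((↑i : Int)) - 1 = ↑k := by simp [hidef]
  have hmem := mem_candA n s i (by omega)
  set cand := (PySem.List.pyRange (↑i * 2) (↑n + 1) ↑i).filter
      (fun indp => decide (PySem.List.pyGetD s (↑i - 1) 0 < PySem.List.pyGetD s (indp - 1) 0)) with hcand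
  by_cases hc : cand = []
  · rw [if_pos hc]
    -- no candidates: fDP i = 1 so listA (k+1) = listA k already
    have hsuccs : succsN n s i = [] := by
      rcases hs : succsN n s i with _ | ⟨j, t⟩
      · rfl
      · exfalso
        have hj : j ∈ succsN n s i := by rw [hs]; simp
        have : (↑j : Int) ∈ cand := (hmem ↑j).mpr ⟨by
          have := mem_succsN.mp hj
          omega, by simpa using hj⟩
        rw [hc] at this
        simp at this
    have hf1 : fDP n s i = 1 := by
      rw [fDP_eq, hsuccs]
      simp
    unfold listA
    apply List.map_congr_left
    intro j hj
    rcases Nat.lt_or_ge j k with h | h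
    · rw [if_neg (by omega), if_neg (by omega)]
    · rcases Nat.eq_or_lt_of_le h with h2 | h2
      · rw [if_neg (by omega), if_pos (by omega), ← h2]
        exact hf1.symm
      · rw [if_pos (by omega), if_pos (by omega)]
  · rw [if_neg hc]
    -- candidates exist: the written value is exactly fDP n s i
    have hpos : ∀ y ∈ cand.map (fun indp => PySem.List.pyGetD (listA n s (k + 1)) (indp - 1) 0), 0 ≤ y := by
      intro y hy
      rw [List.mem_map] at hy
      obtain ⟨x, hx, hxy⟩ := hy
      obtain ⟨hx1, hxs⟩ := (hmem x).mp hx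
      obtain ⟨hlt, hle, _, _⟩ := mem_succsN.mp hxs
      rw [pyGetD_one_based _ x hx1] at hxy
      unfold valN at hxy
      rw [listA_getD n s (k+1) (x.toNat - 1) (by omega)] at hxy
      subst hxy
      split
      · exact le_trans (by omega) (fDP_pos n s _)
      · omega
    have hmap : ∀ y, y ∈ cand.map (fun indp => PySem.List.pyGetD (listA n s (k + 1)) (indp - 1) 0) ↔
        y ∈ (succsN n s i).map (fDP n s) := by
      intro y
      rw [List.mem_map, List.mem_map]
      constructor
      · rintro ⟨x, hx, hxy⟩
        obtain ⟨hx1, hxs⟩ := (hmem x).mp hx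
        obtain ⟨hlt, hle, _, _⟩ := mem_succsN.mp hxs
        refine ⟨x.toNat, hxs, ?_⟩
        rw [pyGetD_one_based _ x hx1] at hxy
        unfold valN at hxy
        rw [listA_getD n s (k+1) (x.toNat - 1) (by omega)] at hxy
        rw [if_pos (by omega)] at hxy
        rw [← hxy]
        congr 1
        omega
      · rintro ⟨j, hj, hjy⟩
        obtain ⟨hlt, hle, _, _⟩ := mem_succsN.mp hj
        refine ⟨↑j, (hmem ↑j).mpr ⟨by omega, by simpa using hj⟩, ?_⟩
        rw [pyGetD_one_based _ ↑j (by exact_mod_cast (by omega : 1 ≤ j))]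
        unfold valN
        simp only [Int.toNat_natCast]
        rw [listA_getD n s (k+1) (j - 1) (by omega)]
        rw [if_pos (by omega)]
        rw [← hjy]
        congr 1
        omega
    have hne : cand.map (fun indp => PySem.List.pyGetD (listA n s (k + 1)) (indp - 1) 0) ≠ [] := by
      simpa using hc
    rw [maxD0 _ hne hpos]
    rw [foldl_max_congr_mem 0 hmap]
    -- the read of maxi[ind-1] is 1
    have hread : PySem.List.pyGetD (listA n s (k + 1)) (↑i - 1) 0 = 1 := by
      rw [hcast, PySem.List.pyGetD_of_nonneg _ 0 (by omega)]
      simp only [Int.toNat_natCast]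
      rw [listA_getD n s (k+1) k hk]
      rw [if_neg (by omega)]
    rw [hread]
    have hset : ((↑i : Int) - 1).toNat = k := by omega
    rw [hset]
    -- now: (listA n s (k+1)).set k (1 + fold) = listA n s k
    apply List.ext_getElem
    · simp [listA]
    · intro j hj1 hj2
      simp only [listA, List.length_set, List.length_map, List.length_range] at hj1 hj2 ⊢
      rw [List.getElem_set]
      simp only [List.getElem_map, List.getElem_range]
      split
      · rename_i hjk
        subst hjk
        rw [if_pos (by omega), fDP_eq, hidef]
      · rename_i hjk
        by_cases h : k ≤ j
        · rw [if_pos (by omega), if_pos (by omega)]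
        · rw [if_neg (by omega), if_neg (by omega)]

lemma aLoop (n : Nat) (s : List Int) :
    ∀ k, k ≤ n → (PySem.List.pyRange (↑k) 0 (-1)).foldl (aStep ↑n s) (listA n s k) = listA n s 0 := by
  intro k
  induction k with
  | zero => intro _; rw [PySem.List.pyRange_neg_one_eq_nil (by omega)]; simp
  | succ k ih =>
    intro hk
    rw [PySem.List.pyRange_neg_one_cons (by omega)]
    rw [List.foldl_cons]
    have : ((↑(k + 1) : Int)) - 1 = ↑k := by push_cast; omega
    rw [aStepEq n s k (by omega), this]
    exact ih (by omega)

lemma answer_char (n : Nat) (s : List Int) :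
    answer ↑n s = (PySem.List.max? ((List.range n).map (fun j => fDP n s (j + 1))) (fun x => x)).getD 0 := by
  show (PySem.List.max? ((PySem.List.pyRange ↑n 0 (-1)).foldl (aStep ↑n s)
      (PySem.List.pyRepeat [1] ↑n)) (fun x => x)).getD 0 = _
  have hinit : PySem.List.pyRepeat [(1 : Int)] ↑n = listA n s n := by
    rw [PySem.List.pyRepeat_singleton]
    symm
    rw [List.eq_replicate_iff]
    constructor
    · simp only [listA, List.length_map, List.length_range, Int.toNat_natCast]
    · intro b hb
      unfold listA at hb
      rw [List.mem_map] at hb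
      obtain ⟨j, hj, hjb⟩ := hb
      rw [List.mem_range] at hj
      rw [if_neg (by omega)] at hjb
      exact hjb.symm
  rw [hinit, aLoop n s n (le_refl n)]
  have hfin : listA n s 0 = (List.range n).map (fun j => fDP n s (j + 1)) := by
    unfold listA
    apply List.map_congr_left
    intro j hj
    rw [if_pos (by omega)]
  rw [hfin]

-- ===== B-side: the frontier after k rounds is exactly {j ∈ [1,n] : k+1 ≤ gDP j} =====

-- the frontier invariant, as a predicate on the Int elements of the set
def FrontP (n : Nat) (s : List Int) (k : Nat) (x : Int) : Prop :=
  ∃ j : Nat, x = ↑j ∧ 1 ≤ j ∧ j ≤ n ∧ (k : Int) ≤ gDP s j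

-- a cell has a chain of length k+1 (k ≥ 1) ending there iff some predecessor has one of length k
lemma gDP_succ_iff (s : List Int) (k : Nat) (hk : 1 ≤ k) (j : Nat) :
    ((k : Int) + 1 ≤ gDP s j) ↔ ∃ d ∈ predsN s j, (k : Int) ≤ gDP s d := by
  rw [gDP_eq]
  constructor
  · intro h
    have hfold : (k : Int) ≤ ((predsN s j).map (gDP s)).foldl max 0 := by omega
    rcases PySem.List.foldl_max_mem ((predsN s j).map (gDP s)) 0 with h1 | h1
    · rw [h1] at hfold; exact absurd hfold (by omega)
    · rw [List.mem_map] at h1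
      obtain ⟨d, hd, hdv⟩ := h1
      exact ⟨d, hd, by rw [hdv]; exact hfold⟩
  · rintro ⟨d, hd, hdk⟩
    have hmem : gDP s d ∈ (predsN s j).map (gDP s) := List.mem_map_of_mem hd
    have := (PySem.List.le_foldl_max ((predsN s j).map (gDP s)) 0).2 _ hmem
    omega

-- membership in B's inner loop: nxt keeps its elements and gains the qualifying multiples
lemma mem_foldl_bAdd (s : List Int) (i : Int) :
    ∀ (l : List Int) (acc : List Int) (x : Int),
      x ∈ l.foldl (bAdd s i) acc ↔
        x ∈ acc ∨ (x ∈ l ∧ PySem.List.pyGetD s (i - 1) 0 < PySem.List.pyGetD s (x - 1) 0) := by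
  intro l
  induction l with
  | nil => intro acc x; simp
  | cons y t ih =>
    intro acc x
    simp only [List.foldl_cons, ih, List.mem_cons]
    unfold bAdd
    by_cases hy : PySem.List.pyGetD s (i - 1) 0 < PySem.List.pyGetD s (y - 1) 0
    · rw [if_pos hy, PySem.Set.mem_add]
      constructor
      · rintro (⟨h | h⟩ | h)
        · exact Or.inl h
        · exact Or.inr ⟨Or.inl h, by rw [h]; exact hy⟩
        · exact Or.inr ⟨Or.inr h.1, h.2⟩
      · rintro (h | ⟨h | h, hc⟩)
        · exact Or.inl (Or.inl h)
        · exact Or.inl (Or.inr h)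
        · exact Or.inr ⟨h, hc⟩
    · rw [if_neg hy]
      constructor
      · rintro (h | h)
        · exact Or.inl h
        · exact Or.inr ⟨Or.inr h.1, h.2⟩
      · rintro (h | ⟨h | h, hc⟩)
        · exact Or.inl h
        · exact absurd (by rw [← h]; exact hc) hy
        · exact Or.inr ⟨h, hc⟩

-- membership in one whole BFS round
lemma mem_bNext (n_ini : Int) (s : List Int) :
    ∀ (l : List Int) (acc : List Int) (x : Int),
      x ∈ l.foldl (fun nxt i => (PySem.List.pyRange (2 * i) (n_ini + 1) i).foldl (bAdd s i) nxt) acc ↔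
        x ∈ acc ∨ ∃ i ∈ l, x ∈ PySem.List.pyRange (2 * i) (n_ini + 1) i ∧
          PySem.List.pyGetD s (i - 1) 0 < PySem.List.pyGetD s (x - 1) 0 := by
  intro l
  induction l with
  | nil => intro acc x; simp
  | cons y t ih =>
    intro acc x
    simp only [List.foldl_cons, ih, mem_foldl_bAdd, List.mem_cons]
    constructor
    · rintro ((h | h) | ⟨i, hi, h⟩)
      · exact Or.inl h
      · exact Or.inr ⟨y, Or.inl rfl, h⟩
      · exact Or.inr ⟨i, Or.inr hi, h⟩
    · rintro (h | ⟨i, hi | hi, h⟩)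
      · exact Or.inl (Or.inl h)
      · subst hi; exact Or.inl (Or.inr h)
      · exact Or.inr ⟨i, hi, h⟩

-- one BFS round moves the frontier from {gDP ≥ k} to {gDP ≥ k+1}
lemma frontier_step (n : Nat) (s : List Int) (k : Nat) (hk : 1 ≤ k) (frontier : List Int)
    (hf : ∀ x, x ∈ frontier ↔ FrontP n s k x) :
    ∀ x, x ∈ bNext ↑n s frontier ↔ FrontP n s (k + 1) x := by
  intro x
  unfold bNext
  rw [mem_bNext]
  constructor
  · rintro (h | ⟨i, hi, hrange, hcond⟩)
    · exact absurd h (by simp [PySem.Set.empty])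
    · obtain ⟨i0, rfl, hi1, hi2, hig⟩ := (hf i).mp hi
      have hcand : (1 ≤ x ∧ x.toNat ∈ succsN n s i0) := by
        rw [← mem_candA n s i0 hi1 x, List.mem_filter]
        exact ⟨by rwa [mul_comm] at hrange, by simpa using hcond⟩
      obtain ⟨hx1, hxs⟩ := hcand
      obtain ⟨hlt, hle, hdvd, hv⟩ := mem_succsN.mp hxs
      refine ⟨x.toNat, (Int.toNat_of_nonneg (by omega)).symm, by omega, hle, ?_⟩
      have hd : i0 ∈ predsN s x.toNat := mem_predsN.mpr ⟨hi1, hlt, hdvd, hv⟩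
      push_cast
      exact (gDP_succ_iff s k hk x.toNat).mpr ⟨i0, hd, hig⟩
  · rintro ⟨j, rfl, hj1, hj2, hjg⟩
    have hjg' : (k : Int) + 1 ≤ gDP s j := by push_cast at hjg; omega
    obtain ⟨d, hd, hdk⟩ := (gDP_succ_iff s k hk j).mp hjg'
    obtain ⟨hd1, hd2, hdvd, hv⟩ := mem_predsN.mp hd
    have hjs : ((↑j : Int)).toNat ∈ succsN n s d := by
      rw [Int.toNat_natCast]
      exact mem_succsN.mpr ⟨hd2, hj2, hdvd, hv⟩
    have hfil := (mem_candA n s d hd1 ↑j).mpr ⟨by exact_mod_cast hj1, hjs⟩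
    rw [List.mem_filter, decide_eq_true_eq] at hfil
    exact Or.inr ⟨↑d, (hf ↑d).mpr ⟨d, rfl, hd1, by omega, hdk⟩,
      by rw [mul_comm]; exact hfil.1, hfil.2⟩

-- the answer's value: the maximum of gDP over 1..n
lemma bLoop_inv (n : Nat) (s : List Int) (M : Int)
    (hM1 : ∃ j : Nat, 1 ≤ j ∧ j ≤ n ∧ gDP s j = M)
    (hM2 : ∀ j : Nat, 1 ≤ j → j ≤ n → gDP s j ≤ M) :
    ∀ (fuel k : Nat) (frontier : List Int),
      (∀ x, x ∈ frontier ↔ FrontP n s (k + 1) x) →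
      (k : Int) ≤ M → M.toNat ≤ k + fuel →
      bLoop ↑n s fuel frontier ↑k = M := by
  obtain ⟨j0, hj01, hj02, hj0M⟩ := hM1
  have hMpos : 1 ≤ M := hj0M ▸ gDP_pos s j0
  intro fuel
  induction fuel with
  | zero =>
    intro k frontier _ hkM hfuel
    show (↑k : Int) = M
    omega
  | succ fuel ih =>
    intro k frontier hf hkM hfuel
    show (if frontier = [] then (↑k : Int)
      else bLoop ↑n s fuel (bNext ↑n s frontier) (↑k + 1)) = M
    by_cases hemp : frontier = []
    · rw [if_pos hemp]
      -- empty frontier: nobody has a chain of length k+1, so gDP j0 = M ≤ k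
      by_contra hne
      have hMk : (↑k : Int) < M := lt_of_le_of_ne hkM (by omega)
      have : (↑j0 : Int) ∈ frontier := (hf ↑j0).mpr ⟨j0, rfl, hj01, hj02, by push_cast; omega⟩
      rw [hemp] at this
      simp at this
    · rw [if_neg hemp]
      -- nonempty: some j has gDP ≥ k+1, so k+1 ≤ M
      obtain ⟨x, hx⟩ := List.exists_mem_of_ne_nil frontier hemp
      obtain ⟨j, rfl, hj1, hj2, hjg⟩ := (hf x).mp hx
      have hk1M : (↑(k + 1) : Int) ≤ M := le_trans (by push_cast; omega) (hM2 j hj1 hj2)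
      have hstep := frontier_step n s (k + 1) (by omega) frontier hf
      have : ((↑k : Int) + 1) = ↑(k + 1) := by push_cast; ring
      rw [this]
      exact ih (k + 1) (bNext ↑n s frontier) hstep (by push_cast at hk1M ⊢; omega) (by omega)

lemma answer_alt_char (n : Nat) (s : List Int) (hn : 1 ≤ n) :
    answer_alt ↑n s = (PySem.List.max? ((List.range n).map (fun j => gDP s (j + 1))) (fun x => x)).getD 0 := by
  have hne : (List.range n).map (fun j => gDP s (j + 1)) ≠ [] := by
    simp [List.map_eq_nil_iff, List.range_eq_nil]; omega
  obtain ⟨M, hM⟩ : ∃ m, PySem.List.max? ((List.range n).map (fun j => gDP s (j + 1))) (fun x => x) = some m := by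
    cases hx : PySem.List.max? ((List.range n).map (fun j => gDP s (j + 1))) (fun x => x) with
    | none => exact absurd ((PySem.List.max?_eq_none_iff _ _).mp hx) hne
    | some m => exact ⟨m, rfl⟩
  rw [hM, Option.getD_some]
  have hM1 : ∃ j : Nat, 1 ≤ j ∧ j ≤ n ∧ gDP s j = M := by
    have hmem := PySem.List.max?_mem hM
    rw [List.mem_map] at hmem
    obtain ⟨j, hj, hjM⟩ := hmem
    rw [List.mem_range] at hj
    exact ⟨j + 1, by omega, by omega, hjM⟩
  have hM2 : ∀ j : Nat, 1 ≤ j → j ≤ n → gDP s j ≤ M := by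
    intro j hj1 hj2
    have : gDP s j ∈ (List.range n).map (fun j => gDP s (j + 1)) := by
      rw [List.mem_map]
      exact ⟨j - 1, by rw [List.mem_range]; omega, by congr 1; omega⟩
    simpa using PySem.List.max?_isMax hM _ this
  obtain ⟨j0, hj01, hj02, hj0M⟩ := hM1
  have hMn : M ≤ ↑n := le_trans (hj0M ▸ gDP_le s j0 hj01) (by exact_mod_cast hj02)
  have hfin := bLoop_inv n s M ⟨j0, hj01, hj02, hj0M⟩ hM2 (n + 1) 0
    (PySem.Set.ofList (PySem.List.pyRange 1 (↑n + 1) 1))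
    (by
      intro x
      rw [PySem.Set.mem_ofList, PySem.List.mem_pyRange_one]
      constructor
      · rintro ⟨h1, h2⟩
        exact ⟨x.toNat, (Int.toNat_of_nonneg (by omega)).symm, by omega, by omega,
          by simpa using gDP_pos s x.toNat⟩
      · rintro ⟨j, rfl, hj1, hj2, _⟩
        constructor <;> [exact_mod_cast hj1; exact_mod_cast (by omega : (j : Int) < ↑n + 1)])
    (by simpa using le_trans (by norm_num) (hj0M ▸ gDP_pos s j0))
    (by omega)
  show bLoop ↑n s ((↑n : Int).toNat + 1) (PySem.Set.ofList (PySem.List.pyRange 1 (↑n + 1) 1)) 0 = M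
  rw [Int.toNat_natCast]
  simpa using hfin

-- full equality of the two ports on Pre_
lemma answer_eq_alt (n_ini : Int) (s : List Int) (h : 1 ≤ n_ini) :
    answer n_ini s = answer_alt n_ini s := by
  have hn : n_ini = ↑n_ini.toNat := by omega
  rw [hn, answer_char n_ini.toNat s, answer_alt_char n_ini.toNat s (by omega),
      max_f_eq_max_g n_ini.toNat s (by omega)]

-- ===== VERDICT (by name: the statement is the Claim_ definition above) =====
theorem answer_spec : Claim_equal_answer := by
  intro n_ini s_ini _ hpre
  unfold Spec_answer
  exact answer_eq_alt n_ini s_ini hpre.1
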